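-- pv_equiv track=rewrite | github.com/seek-apps/qgre-engine | qgre/segments.py | segment_completion
-- ===== SOURCE A (Python) =====
-- THINK_START = 151667  # <think> — single special token
--
-- THINK_END = 151668    # </think> — single special token
--
-- STEP_TOKEN = 9520     # 'step'
--
-- OPEN_ANGLE = 27       # '<'
--
-- CLOSE_SLASH = 522     # '</'
--
-- CLOSE_ANGLE = 29      # '>'
--
-- STEP_NUM_TOKENS = {16: 1, 17: 2, 18: 3, 19: 4}  # token_id → step_number
--
-- def segment_completion(token_ids: list[int]) -> list[str]:
--     """Assign each token to a region: THINK, STEP_1..4, FORMAT, OTHER.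
--
--     Uses token ID patterns, not decoded text. Fast, exact.
--     Returns list[str] of region labels, same length as token_ids.
--     """
--     regions = ["OTHER"] * len(token_ids)
--     current = "OTHER"
--     n = len(token_ids)
--
--     i = 0
--     while i < n:
--         tid = token_ids[i]
--
--         # Think block boundaries (single special tokens — reliable)
--         if tid == THINK_START:
--             current = "THINK"
--             regions[i] = "THINK"
--             i += 1
--             continue
--
--         if tid == THINK_END:
--             regions[i] = "THINK"
--             current = "OTHER"
--             i += 1
--             continue
--
--         # Step opening tag: < step N ...>
--         # Pattern: OPEN_ANGLE(27) STEP_TOKEN(9520) NUM(16-19) ...content... CLOSE_ANGLE(29)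
--         if tid == OPEN_ANGLE and i + 2 < n:
--             if token_ids[i + 1] == STEP_TOKEN and token_ids[i + 2] in STEP_NUM_TOKENS:
--                 step = STEP_NUM_TOKENS[token_ids[i + 2]]
--                 current = f"STEP_{step}"
--                 # Mark the opening tag tokens as FORMAT
--                 j = i
--                 while j < n and token_ids[j] != CLOSE_ANGLE:
--                     regions[j] = "FORMAT"
--                     j += 1
--                 if j < n:
--                     regions[j] = "FORMAT"  # the > itself
--                 i = j + 1
--                 continue
--
--         # Step closing tag: </ step N ...>
--         if tid == CLOSE_SLASH and i + 2 < n: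
--             if token_ids[i + 1] == STEP_TOKEN and token_ids[i + 2] in STEP_NUM_TOKENS:
--                 # Mark closing tag tokens as FORMAT
--                 j = i
--                 while j < n and token_ids[j] != CLOSE_ANGLE:
--                     regions[j] = "FORMAT"
--                     j += 1
--                 if j < n:
--                     regions[j] = "FORMAT"
--                 current = "OTHER"
--                 i = j + 1
--                 continue
--
--         regions[i] = current
--         i += 1
--
--     return regions
-- ===== SOURCE B (Python) =====
-- THINK_START = 151667
-- THINK_END = 151668
-- STEP_TOKEN = 9520
-- OPEN_ANGLE = 27
-- CLOSE_SLASH = 522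
-- CLOSE_ANGLE = 29
-- STEP_NUM_TOKENS = {16: 1, 17: 2, 18: 3, 19: 4}
--
-- def segment_completion(token_ids: list[int]) -> list[str]:
--     """Flat one-step-per-token pass: a current-region variable plus an in_tag
--     flag replace the nested scan-and-jump over step tags."""
--     n = len(token_ids)
--     out = []
--     current = "OTHER"
--     in_tag = False
--     for i, tid in enumerate(token_ids):
--         if in_tag:
--             out.append("FORMAT")
--             if tid == CLOSE_ANGLE:
--                 in_tag = False
--         elif tid == THINK_START:
--             current = "THINK"
--             out.append("THINK")
--         elif tid == THINK_END:
--             out.append("THINK")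
--             current = "OTHER"
--         elif (tid == OPEN_ANGLE or tid == CLOSE_SLASH) and i + 2 < n \
--                 and token_ids[i + 1] == STEP_TOKEN and token_ids[i + 2] in STEP_NUM_TOKENS:
--             if tid == OPEN_ANGLE:
--                 current = f"STEP_{STEP_NUM_TOKENS[token_ids[i + 2]]}"
--             else:
--                 current = "OTHER"
--             in_tag = True
--             out.append("FORMAT")
--         else:
--             out.append(current)
--     return out
-- ===== Notes on version B (the rewrite author's own statement) =====
-- stated objective: faster
-- what changed: Replaces A's nested scan-and-jump (inner while loop that re-walks tag tokens and resets the outer index into a preallocated mutable regions array) with a flat one-step-per-token pass that appends labels, tracking only a current-region variable and an in_tag flag.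
import Mathlib
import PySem

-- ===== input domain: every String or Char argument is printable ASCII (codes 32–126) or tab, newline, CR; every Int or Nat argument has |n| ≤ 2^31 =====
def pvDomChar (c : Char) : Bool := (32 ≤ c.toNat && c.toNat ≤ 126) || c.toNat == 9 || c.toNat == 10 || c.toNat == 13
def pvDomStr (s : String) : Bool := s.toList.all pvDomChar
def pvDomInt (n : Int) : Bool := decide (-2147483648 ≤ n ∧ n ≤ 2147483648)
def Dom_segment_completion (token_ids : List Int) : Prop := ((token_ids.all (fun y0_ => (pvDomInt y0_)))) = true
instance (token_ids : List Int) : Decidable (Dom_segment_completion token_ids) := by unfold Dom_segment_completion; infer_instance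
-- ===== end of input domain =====

-- B is a flat one-step-per-token pass (current region + in_tag flag) replacing A's nested
-- scan-and-jump over step tags; same return value, same cost class.

-- module-level dict STEP_NUM_TOKENS = {16: 1, 17: 2, 18: 3, 19: 4}
def STEP_NUM_TOKENS : PySem.Dict Int Int := PySem.Dict.ofList [(16, 1), (17, 2), (18, 3), (19, 4)]

-- ===== PORT A =====
-- inner while loop: 'while j < n and token_ids[j] != CLOSE_ANGLE: regions[j]="FORMAT"; j += 1'
-- (fuel only makes the recursion structural; callers pass fuel ≥ n - j, so it never runs out.
--  token_ids.getD j 0 is exact here: j < n = token_ids.length)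
def aScan (tok : List Int) (n : Nat) : Nat → List String → Nat → List String × Nat
  | 0, regions, j => (regions, j)
  | fuel + 1, regions, j =>
    if j < n then
      if tok.getD j 0 ≠ 29 then aScan tok n fuel (regions.set j "FORMAT") (j + 1)
      else (regions, j)
    else (regions, j)

-- outer while loop of A (fuel ≥ n - i at every call; i strictly increases each iteration)
def aLoop (tok : List Int) (n : Nat) : Nat → List String → String → Nat → List String
  | 0, regions, _, _ => regions
  | fuel + 1, regions, current, i =>
    if i < n then
      let tid := tok.getD i 0
      if tid = 151667 then
        aLoop tok n fuel (regions.set i "THINK") "THINK" (i + 1)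
      else if tid = 151668 then
        aLoop tok n fuel (regions.set i "THINK") "OTHER" (i + 1)
      else if tid = 27 ∧ i + 2 < n ∧ tok.getD (i + 1) 0 = 9520 ∧
          (STEP_NUM_TOKENS.get? (tok.getD (i + 2) 0)).isSome then
        let step := STEP_NUM_TOKENS.getD (tok.getD (i + 2) 0) 0
        let p := aScan tok n (fuel + 1) regions i
        let r := if p.2 < n then p.1.set p.2 "FORMAT" else p.1
        aLoop tok n fuel r ("STEP_" ++ PySem.Int.toStr step) (p.2 + 1)
      else if tid = 522 ∧ i + 2 < n ∧ tok.getD (i + 1) 0 = 9520 ∧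
          (STEP_NUM_TOKENS.get? (tok.getD (i + 2) 0)).isSome then
        let p := aScan tok n (fuel + 1) regions i
        let r := if p.2 < n then p.1.set p.2 "FORMAT" else p.1
        aLoop tok n fuel r "OTHER" (p.2 + 1)
      else
        aLoop tok n fuel (regions.set i current) current (i + 1)
    else regions

def segment_completion (token_ids : List Int) : List String :=
  aLoop token_ids token_ids.length token_ids.length
    (List.replicate token_ids.length "OTHER") "OTHER" 0

-- ===== PORT B =====
-- the for-loop of Source B: state = (current, in_tag); 'rest' plays token_ids[i+1:], so
-- 'i + 2 < n' is '2 ≤ rest.length' and token_ids[i+1], token_ids[i+2] are rest.getD 0/1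
def altGo (current : String) (inTag : Bool) : List Int → List String
  | [] => []
  | tid :: rest =>
    if inTag then
      "FORMAT" :: altGo current (if tid = 29 then false else true) rest
    else if tid = 151667 then
      "THINK" :: altGo "THINK" false rest
    else if tid = 151668 then
      "THINK" :: altGo "OTHER" false rest
    else if (tid = 27 ∨ tid = 522) ∧ 2 ≤ rest.length ∧ rest.getD 0 0 = 9520 ∧
        (STEP_NUM_TOKENS.get? (rest.getD 1 0)).isSome then
      "FORMAT" ::
        altGo (if tid = 27 then "STEP_" ++ PySem.Int.toStr (STEP_NUM_TOKENS.getD (rest.getD 1 0) 0)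
               else "OTHER") true rest
    else
      current :: altGo current false rest

def segment_completion_alt (token_ids : List Int) : List String :=
  altGo "OTHER" false token_ids

-- ===== PRECONDITION & SPEC =====
def Spec_segment_completion (token_ids : List Int) (out : List String) : Prop := out = segment_completion_alt token_ids
instance (token_ids : List Int) (out : List String) : Decidable (Spec_segment_completion token_ids out) := by unfold Spec_segment_completion; infer_instance

-- ===== CLAIM (what is proved, stated in full; the proofs are below) =====
def Claim_equal_segment_completion : Prop := ∀ (token_ids : List Int), Dom_segment_completion token_ids → Spec_segment_completion token_ids (segment_completion token_ids)

-- ===== LEMMAS AND PROOFS =====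

theorem altGo_true (cur : String) (l : List Int) :
    altGo cur true l =
      List.replicate (min (l.findIdx (fun t => t == 29) + 1) l.length) "FORMAT" ++
        altGo cur false (l.drop (l.findIdx (fun t => t == 29) + 1)) := by
  induction l with
  | nil => simp [altGo]
  | cons t rest ih =>
    by_cases ht : t = 29
    · subst ht
      simp [altGo, List.findIdx_cons]
    · have : (t == (29 : Int)) = false := by simpa using ht
      simp only [altGo, List.findIdx_cons, this, cond_false, if_neg ht, ih]
      have hmin : min (rest.findIdx (fun t => t == 29) + 1 + 1) (t :: rest).length
          = min (rest.findIdx (fun t => t == 29) + 1) rest.length + 1 := by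
        have := List.findIdx_le_length (p := fun t => t == (29 : Int)) (xs := rest)
        simp only [List.length_cons]; omega
      rw [hmin, List.replicate_succ]
      simp

theorem aScan_spec (tok : List Int) : ∀ (fuel j : Nat) (regions : List String),
    tok.length - j ≤ fuel → regions.length = tok.length →
    aScan tok tok.length fuel regions j =
      (regions.take j ++ List.replicate ((tok.drop j).findIdx (fun t => t == 29)) "FORMAT" ++
         regions.drop (j + (tok.drop j).findIdx (fun t => t == 29)),
       j + (tok.drop j).findIdx (fun t => t == 29)) := by
  intro fuel
  induction fuel with
  | zero =>
    intro j r hk hlen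
    have hj : tok.length ≤ j := by omega
    have hd : tok.drop j = [] := List.drop_eq_nil_of_le hj
    rw [hd]
    simp [aScan, List.take_of_length_le (by omega : r.length ≤ j),
      List.drop_eq_nil_of_le (by omega : r.length ≤ j)]
  | succ fuel ih =>
      intro j r hk hlen
      by_cases hj : j < tok.length
      · have hget : tok.getD j 0 = tok[j] := List.getD_eq_getElem tok 0 hj
        have hd : tok.drop j = tok[j] :: tok.drop (j + 1) := List.drop_eq_getElem_cons hj
        by_cases h29 : tok[j] = (29 : Int)
        · simp only [aScan]
          rw [hd, List.findIdx_cons]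
          simp [hj, h29, List.take_append_drop]
        · have hb : (tok[j] == (29 : Int)) = false := by simpa using h29
          simp only [aScan]
          rw [hd, List.findIdx_cons, hb]
          simp only [hj, if_pos, cond_false]
          rw [hget, if_pos h29]
          rw [ih (j + 1) (r.set j "FORMAT") (by omega) (by simpa using hlen)]
          have hjr : j < r.length := by omega
          have hset : r.set j "FORMAT" = r.take j ++ "FORMAT" :: r.drop (j + 1) := by
            rw [List.set_eq_take_append_cons_drop, if_pos hjr]
          have hlt : (r.take j).length = j := by simp; omega
          have h1 : (r.set j "FORMAT").take (j + 1) = r.take j ++ ["FORMAT"] := by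
            rw [hset, List.take_append, hlt]
            have h2 : j + 1 - j = 1 := by omega
            rw [h2, List.take_take]
            simp
          rw [h1, List.drop_set_of_lt (by omega), List.replicate_succ]
          refine Prod.ext ?_ (by simp; omega)
          simp only [List.append_assoc, List.singleton_append]
          have h3 : j + 1 + (tok.drop (j + 1)).findIdx (fun t => t == 29)
              = j + ((tok.drop (j + 1)).findIdx (fun t => t == 29) + 1) := by omega
          rw [h3]
      · have hd : tok.drop j = [] := List.drop_eq_nil_of_le (by omega)
        simp only [aScan]
        rw [hd]
        simp [hj, List.take_of_length_le (by omega : r.length ≤ j),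
          List.drop_eq_nil_of_le (by omega : r.length ≤ j)]


theorem take_set_succ (r : List String) (j : Nat) (a : String) (h : j < r.length) :
    (r.set j a).take (j + 1) = r.take j ++ [a] := by
  rw [List.set_eq_take_append_cons_drop, if_pos h, List.take_append,
    List.length_take_of_le h.le]
  have h2 : j + 1 - j = 1 := by omega
  rw [h2, List.take_take]
  simp

-- the common shape of A's two tag branches (scan to '>', mark it, resume) against
-- B's in_tag run; the caller supplies the one-step unfolding of altGo at the trigger token
theorem tag_case (tok : List Int) (k i : Nat) (r : List String) (cur cur' : String)
    (ih : ∀ (i' : Nat) (r' : List String) (c : String), tok.length - i' ≤ k →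
      r'.length = tok.length →
      aLoop tok tok.length k r' c i' = r'.take i' ++ altGo c false (tok.drop i'))
    (hk : tok.length - i ≤ k + 1)
    (hlen : r.length = tok.length) (hi : i < tok.length) (hnot29 : tok[i] ≠ (29 : Int))
    (hguard : altGo cur false (tok[i] :: tok.drop (i + 1)) =
      "FORMAT" :: altGo cur' true (tok.drop (i + 1))) :
    aLoop tok tok.length k
      (if (aScan tok tok.length (k + 1) r i).2 < tok.length then
        (aScan tok tok.length (k + 1) r i).1.set (aScan tok tok.length (k + 1) r i).2 "FORMAT"
       else (aScan tok tok.length (k + 1) r i).1)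
      cur' ((aScan tok tok.length (k + 1) r i).2 + 1)
      = r.take i ++ altGo cur false (tok.drop i) := by
  have hd : tok.drop i = tok[i] :: tok.drop (i + 1) := List.drop_eq_getElem_cons hi
  have hm'le : (tok.drop (i + 1)).findIdx (fun t => t == 29) ≤ tok.length - (i + 1) := by
    have := List.findIdx_le_length (p := fun t => t == (29 : Int)) (xs := tok.drop (i + 1))
    simpa using this
  set m' := (tok.drop (i + 1)).findIdx (fun t => t == 29) with hm'
  have hb29 : (tok[i] == (29 : Int)) = false := by simpa using hnot29
  have hfm : (tok.drop i).findIdx (fun t => t == 29) = m' + 1 := by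
    rw [hd, List.findIdx_cons]
    simp [hb29, hm']
  rw [aScan_spec tok (k + 1) i r hk hlen]
  simp only [hfm]
  rw [hd, hguard, altGo_true, ← hm', List.drop_drop]
  have hlA : (r.take i).length = i := List.length_take_of_le (by omega)
  have hlAB : (r.take i ++ List.replicate (m' + 1) "FORMAT").length = i + (m' + 1) := by
    simp [hlA]
  by_cases hcl : i + (m' + 1) < tok.length
  · rw [if_pos hcl]
    rw [ih (i + (m' + 1) + 1) _ _ (by omega) (by simp [hlen]; omega)]
    rw [take_set_succ _ _ _ (by simp [hlen]; omega)]
    rw [List.take_left' hlAB]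
    have hmin : min (m' + 1) (tok.drop (i + 1)).length = m' + 1 := by
      rw [List.length_drop]; omega
    rw [hmin]
    have hidx : i + 1 + (m' + 1) = i + (m' + 1) + 1 := by omega
    rw [hidx, List.append_assoc, List.append_assoc]
    congr 1
    rw [← List.append_assoc, ← List.replicate_succ', List.replicate_succ]
    simp
  · rw [if_neg hcl]
    have hEq : i + (m' + 1) = tok.length := by omega
    have hdropnil : r.drop (i + (m' + 1)) = [] := List.drop_eq_nil_of_le (by omega)
    rw [ih (i + (m' + 1) + 1) _ _ (by omega) (by simp [hlen, hdropnil]; omega)]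
    rw [List.take_of_length_le (by simp [hlen, hdropnil]; omega),
      List.drop_eq_nil_of_le (by omega : tok.length ≤ i + (m' + 1) + 1)]
    have hmin : min (m' + 1) (tok.drop (i + 1)).length = m' := by
      rw [List.length_drop]; omega
    have hdrop2 : tok.drop (i + 1 + (m' + 1)) = [] := List.drop_eq_nil_of_le (by omega)
    rw [hmin, hdrop2, hdropnil]
    simp [altGo, List.replicate_succ]

theorem aLoop_eq (tok : List Int) : ∀ (k i : Nat) (regions : List String) (cur : String),
    tok.length - i ≤ k → regions.length = tok.length →
    aLoop tok tok.length k regions cur i = regions.take i ++ altGo cur false (tok.drop i) := by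
  intro k
  induction k with
  | zero =>
    intro i r cur hk hlen
    have hi : tok.length ≤ i := by omega
    simp [aLoop, List.drop_eq_nil_of_le hi, altGo,
      List.take_of_length_le (by omega : r.length ≤ i)]
  | succ k ih =>
    intro i r cur hk hlen
    by_cases hi : i < tok.length
    · have hget : tok.getD i 0 = tok[i] := List.getD_eq_getElem tok 0 hi
      have hd : tok.drop i = tok[i] :: tok.drop (i + 1) := List.drop_eq_getElem_cons hi
      have hg1 : (tok.drop (i + 1)).getD 0 0 = tok.getD (i + 1) 0 := by
        simp [List.getD_eq_getElem?_getD, List.getElem?_drop]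
      have hg2 : (tok.drop (i + 1)).getD 1 0 = tok.getD (i + 2) 0 := by
        simp [List.getD_eq_getElem?_getD, List.getElem?_drop]
      have hrl : (tok.drop (i + 1)).length = tok.length - (i + 1) := by simp
      simp only [aLoop]
      rw [if_pos hi]
      simp only [hget]
      by_cases h1 : tok[i] = (151667 : Int)
      · rw [if_pos h1, ih (i + 1) _ _ (by omega) (by simpa using hlen)]
        rw [take_set_succ _ _ _ (by omega), hd]
        simp [altGo, h1]
      · rw [if_neg h1]
        by_cases h2 : tok[i] = (151668 : Int)
        · rw [if_pos h2, ih (i + 1) _ _ (by omega) (by simpa using hlen)]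
          rw [take_set_succ _ _ _ (by omega), hd]
          simp [altGo, h2]
        · rw [if_neg h2]
          by_cases h3 : tok[i] = (27 : Int) ∧ i + 2 < tok.length ∧ tok.getD (i + 1) 0 = 9520 ∧
              (STEP_NUM_TOKENS.get? (tok.getD (i + 2) 0)).isSome
          · rw [if_pos h3]
            obtain ⟨h27, hlt2, hp1, hp2⟩ := h3
            have hguard : altGo cur false (tok[i] :: tok.drop (i + 1)) =
                "FORMAT" :: altGo ("STEP_" ++
                  PySem.Int.toStr (STEP_NUM_TOKENS.getD (tok.getD (i + 2) 0) 0)) true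
                  (tok.drop (i + 1)) := by
              simp only [altGo, if_neg h1, if_neg h2]
              rw [if_neg (by simp : ¬ (false = true)), if_pos ⟨Or.inl h27, by rw [hrl]; omega,
                by rw [hg1]; exact hp1, by rw [hg2]; exact hp2⟩, if_pos h27, hg2]
            exact tag_case tok k i r cur _ ih hk hlen hi (by simp [h27]) hguard
          · rw [if_neg h3]
            by_cases h4 : tok[i] = (522 : Int) ∧ i + 2 < tok.length ∧ tok.getD (i + 1) 0 = 9520 ∧
                (STEP_NUM_TOKENS.get? (tok.getD (i + 2) 0)).isSome
            · rw [if_pos h4]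
              obtain ⟨h522, hlt2, hp1, hp2⟩ := h4
              have hguard : altGo cur false (tok[i] :: tok.drop (i + 1)) =
                  "FORMAT" :: altGo "OTHER" true (tok.drop (i + 1)) := by
                simp only [altGo, if_neg h1, if_neg h2]
                rw [if_neg (by simp : ¬ (false = true)), if_pos ⟨Or.inr h522, by rw [hrl]; omega,
                  by rw [hg1]; exact hp1, by rw [hg2]; exact hp2⟩,
                  if_neg (by simp [h522] : ¬ tok[i] = (27 : Int))]
              exact tag_case tok k i r cur _ ih hk hlen hi (by simp [h522]) hguard
            · rw [if_neg h4]
              rw [ih (i + 1) _ _ (by omega) (by simpa using hlen)]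
              rw [take_set_succ _ _ _ (by omega)]
              have hng : ¬ ((tok[i] = (27 : Int) ∨ tok[i] = (522 : Int)) ∧
                  2 ≤ (tok.drop (i + 1)).length ∧ (tok.drop (i + 1)).getD 0 0 = 9520 ∧
                  (STEP_NUM_TOKENS.get? ((tok.drop (i + 1)).getD 1 0)).isSome) := by
                rw [hg1, hg2, hrl]
                rintro ⟨h27 | h522, hlen2, hp1, hp2⟩
                · exact h3 ⟨h27, by omega, hp1, hp2⟩
                · exact h4 ⟨h522, by omega, hp1, hp2⟩
              rw [hd]
              simp only [altGo, if_neg h1, if_neg h2, if_neg hng]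
              simp
    · have hi' : tok.length ≤ i := by omega
      simp only [aLoop]
      rw [if_neg hi]
      simp [List.drop_eq_nil_of_le hi', altGo,
        List.take_of_length_le (by omega : r.length ≤ i)]

-- ===== VERDICT (by name: the statement is the Claim_ definition above) =====
theorem segment_completion_spec : Claim_equal_segment_completion := by
  intro tok _
  unfold Spec_segment_completion segment_completion segment_completion_alt
  have := aLoop_eq tok tok.length 0 (List.replicate tok.length "OTHER") "OTHER"
    (by omega) (by simp)
  simpa using this
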